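-- pv_equiv track=rewrite | github.com/liza31/databaselabs | lab2/tabulate.py | tabulate
-- ===== SOURCE A (Python) =====
-- from collections.abc import Sequence, Mapping
-- from itertools import chain
-- from typing import Any
--
-- def tabulate(
--         rows: Sequence[Mapping],
--         col_keys: Sequence = None,
--         head_row: bool = True,
--         col_heads: Mapping[Any, str] = None) -> str:
--     """
--     Tabulates table, represented by :class:`Sequence` of rows
--     represented by columnKey-cellValue :class:`Mapping` objects.
--
--     :param rows: :class:`Sequence` of table rows represented by columnKey-cellValue :class:`Mapping` objects
--     :param col_keys: keys of columns to display
--     :param head_row: whether to display headings row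
--     :param col_heads: columnKey-columnHeading :class:`Mapping`
--
--     :return: tabulated table :class:`str`
--     """
--
--     # Handle input parameters
--     col_keys = col_keys or next(iter(rows)).keys()
--     col_heads = (col_heads or {col_key: str(col_key) for col_key in col_keys}) if head_row else None
--
--     # Build columns widths map
--     col_widths = {
--         col_key: max(
--             max(len(str(row[col_key])) for row in rows),
--             len(col_heads[col_key]) if head_row else 0
--         ) + 1
--         for col_key in col_keys
--     }
--
--     # Build rows strings iterator
--     rows_str = (
--         '│' + '│'.join(str(row[col_key]).ljust(col_widths[col_key]) for col_key in col_keys) + '│'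
--         for row in (chain((col_heads,), rows) if head_row else rows)
--     )
--
--     # Build table string
--     table_str = '\n'.join(
--         chain([next(rows_str), '├' + '┼'.join('─' * col_widths[col_key] for col_key in col_keys) + '┤'], rows_str)
--         if head_row else rows_str
--     )
--
--     return table_str
-- ===== SOURCE B (Python) =====
-- def tabulate(rows, col_keys=None, head_row=True, col_heads=None):
--     # B: column-major rendering — each column is rendered and padded independently
--     # (its header cell and rule segment stored as column entries), then the table
--     # lines are assembled by transposing the columns by index.
--     keys = list(col_keys) if col_keys else list(next(iter(rows)).keys())
--     cols = []
--     for k in keys: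
--         cells = [str(r[k]) for r in rows]
--         if head_row:
--             head = str(col_heads[k]) if col_heads else str(k)
--             w = max(max(map(len, cells)), len(head)) + 1
--             cols.append([head.ljust(w), '\u2500' * w] + [c.ljust(w) for c in cells])
--         else:
--             w = max(map(len, cells)) + 1
--             cols.append([c.ljust(w) for c in cells])
--     n = len(rows) + (2 if head_row else 0)
--     lines = []
--     for i in range(n):
--         segs = [col[i] for col in cols]
--         if head_row and i == 1:
--             lines.append('\u251c' + '\u253c'.join(segs) + '\u2524')
--         else:
--             lines.append('\u2502' + '\u2502'.join(segs) + '\u2502')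
--     return '\n'.join(lines)
-- ===== Notes on version B (the rewrite author's own statement) =====
-- stated objective: alternative
-- what changed: B renders the table column-major: each column is rendered and padded independently into a list of segments (header cell and rule segment stored in the column), and the output lines are then assembled by transposing the columns by line index, instead of A's widths-dict plus row-by-row rendering with str() and dict lookups at render time.
import Mathlib
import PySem

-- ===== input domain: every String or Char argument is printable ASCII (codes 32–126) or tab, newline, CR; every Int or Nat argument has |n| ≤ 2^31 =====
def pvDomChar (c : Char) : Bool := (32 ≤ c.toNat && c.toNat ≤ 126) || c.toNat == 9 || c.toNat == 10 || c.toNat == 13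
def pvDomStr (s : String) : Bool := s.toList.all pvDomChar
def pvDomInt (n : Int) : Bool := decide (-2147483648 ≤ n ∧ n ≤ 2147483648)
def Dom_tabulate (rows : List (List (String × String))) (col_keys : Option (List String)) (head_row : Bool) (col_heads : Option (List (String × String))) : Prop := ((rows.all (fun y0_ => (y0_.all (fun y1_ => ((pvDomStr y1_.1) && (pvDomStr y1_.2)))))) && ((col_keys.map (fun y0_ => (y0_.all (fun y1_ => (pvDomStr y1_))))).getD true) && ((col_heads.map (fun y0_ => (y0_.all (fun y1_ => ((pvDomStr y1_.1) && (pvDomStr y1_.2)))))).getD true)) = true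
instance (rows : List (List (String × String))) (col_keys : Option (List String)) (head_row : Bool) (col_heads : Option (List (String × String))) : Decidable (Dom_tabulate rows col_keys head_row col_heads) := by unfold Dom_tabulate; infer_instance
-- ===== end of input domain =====

-- B renders the table column-major: each column is rendered and padded on its own
-- (header cell and rule segment stored inside the column), and the lines are then
-- assembled by transposing the columns by line index.

-- shared primitives (Python semantics helpers used by both ports)
-- `col_keys or next(iter(rows)).keys()`: a dict argument is an association list; its
-- Python-dict view is PySem.Dict.ofList (last duplicate wins), keys in insertion order.
def pvKeys (rows : List (List (String × String))) (col_keys : Option (List String)) : List String :=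
  match col_keys with
  | some l => if l = [] then (PySem.Dict.ofList (rows.headD [])).keys else l
  | none => (PySem.Dict.ofList (rows.headD [])).keys

-- len(s) as a Nat (exact: counts code points, = PySem.Str.len)
def pvLen (s : String) : Nat := s.toList.length

-- s.ljust(n): pad with spaces on the right (exact: Python pads to n characters)
def pvLjust (s : String) (n : Nat) : String := String.ofList (s.toList ++ List.replicate (n - pvLen s) ' ')

-- '─' * n
def pvHrule (n : Nat) : String := String.ofList (List.replicate n '─')

-- ===== PORT A =====
-- max(len(str(row[col_key])) for row in rows); Python max() raises ValueError on empty rows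
-- (excluded by Pre_), here defaulted to 0
def pvDataMaxA (rows : List (List (String × String))) (k : String) : Nat :=
  match rows.map (fun r => pvLen ((PySem.Dict.ofList r).getD k "")) with
  | [] => 0
  | x :: xs => xs.foldl max x

-- col_heads or {col_key: str(col_key) for col_key in col_keys}
def pvHeadsA (ks : List String) (col_heads : Option (List (String × String))) : PySem.Dict String String :=
  match col_heads with
  | some d => if d = [] then PySem.Dict.ofList (ks.map fun k => (k, k)) else PySem.Dict.ofList d
  | none => PySem.Dict.ofList (ks.map fun k => (k, k))

-- the col_widths dict comprehension
def pvWidthsA (rows : List (List (String × String))) (ks : List String) (head_row : Bool)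
    (heads : PySem.Dict String String) : PySem.Dict String Nat :=
  PySem.Dict.ofList (ks.map fun k =>
    (k, max (pvDataMaxA rows k) (if head_row then pvLen (heads.getD k "") else 0) + 1))

-- '│' + '│'.join(str(row[col_key]).ljust(col_widths[col_key]) for col_key in col_keys) + '│'
def pvRowStrA (ks : List String) (widths : PySem.Dict String Nat) (row : PySem.Dict String String) : String :=
  "│" ++ PySem.Str.join "│" (ks.map fun k => pvLjust (row.getD k "") (widths.getD k 0)) ++ "│"

def tabulate (rows : List (List (String × String))) (col_keys : Option (List String)) (head_row : Bool) (col_heads : Option (List (String × String))) : String :=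
  let ks := pvKeys rows col_keys
  let heads := pvHeadsA ks col_heads
  let widths := pvWidthsA rows ks head_row heads
  let sep := "├" ++ PySem.Str.join "┼" (ks.map fun k => pvHrule (widths.getD k 0)) ++ "┤"
  if head_row then
    PySem.Str.join "\n" (pvRowStrA ks widths heads :: sep :: rows.map (fun r => pvRowStrA ks widths (PySem.Dict.ofList r)))
  else
    PySem.Str.join "\n" (rows.map (fun r => pvRowStrA ks widths (PySem.Dict.ofList r)))

-- ===== PORT B =====
-- max(map(len, cells)), defaulted to 0 on [] (Python raises ValueError there; excluded by Pre_)
def pvMaxLenB (cells : List String) : Nat :=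
  match cells.map pvLen with
  | [] => 0
  | x :: xs => xs.foldl max x

-- str(col_heads[k]) if col_heads else str(k)
def pvHeadCellB (col_heads : Option (List (String × String))) (k : String) : String :=
  match col_heads with
  | some d => if d = [] then k else (PySem.Dict.ofList d).getD k ""
  | none => k

-- one rendered, padded column (header cell and rule segment included when head_row)
def pvColB (rows : List (List (String × String))) (head_row : Bool)
    (col_heads : Option (List (String × String))) (k : String) : List String :=
  let cells := rows.map fun r => (PySem.Dict.ofList r).getD k ""
  if head_row then
    let head := pvHeadCellB col_heads k
    let w := max (pvMaxLenB cells) (pvLen head) + 1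
    pvLjust head w :: pvHrule w :: cells.map (fun c => pvLjust c w)
  else
    let w := pvMaxLenB cells + 1
    cells.map (fun c => pvLjust c w)

def tabulate_alt (rows : List (List (String × String))) (col_keys : Option (List String)) (head_row : Bool) (col_heads : Option (List (String × String))) : String :=
  let ks := pvKeys rows col_keys
  let cols := ks.map (pvColB rows head_row col_heads)
  let n := rows.length + (if head_row then 2 else 0)
  let lines := (List.range n).map fun i =>
    let segs := cols.map fun col => col.getD i ""
    if head_row = true ∧ i = 1 then "├" ++ PySem.Str.join "┼" segs ++ "┤"
    else "│" ++ PySem.Str.join "│" segs ++ "│"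
  PySem.Str.join "\n" lines

-- ===== PRECONDITION & SPEC =====
-- Pre_ is exactly where Python A returns: rows nonempty (else StopIteration / ValueError),
-- every displayed key present in every row, and — when a headings row with an explicit
-- nonempty col_heads is shown — present in col_heads too (else KeyError).
def Pre_tabulate (rows : List (List (String × String))) (col_keys : Option (List String)) (head_row : Bool) (col_heads : Option (List (String × String))) : Prop :=
  rows ≠ [] ∧
  (∀ r ∈ rows, ∀ k ∈ pvKeys rows col_keys, (PySem.Dict.ofList r).contains k = true) ∧
  (head_row = true → ∀ d, col_heads = some d → d ≠ [] →
    ∀ k ∈ pvKeys rows col_keys, (PySem.Dict.ofList d).contains k = true)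
instance (rows : List (List (String × String))) (col_keys : Option (List String)) (head_row : Bool) (col_heads : Option (List (String × String))) : Decidable (Pre_tabulate rows col_keys head_row col_heads) := by unfold Pre_tabulate; infer_instance

def pvWitness_tabulate : (List (List (String × String))) × Option (List String) × Bool × (Option (List (String × String))) :=
  ([[("id", "1"), ("name", "ada")]], none, true, none)

def Spec_tabulate (rows : List (List (String × String))) (col_keys : Option (List String)) (head_row : Bool) (col_heads : Option (List (String × String))) (out : String) : Prop := out = tabulate_alt rows col_keys head_row col_heads
instance (rows : List (List (String × String))) (col_keys : Option (List String)) (head_row : Bool) (col_heads : Option (List (String × String))) (out : String) : Decidable (Spec_tabulate rows col_keys head_row col_heads out) := by unfold Spec_tabulate; infer_instance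

-- ===== CLAIM (what is proved, stated in full; the proofs are below) =====
def Claim_equal_tabulate : Prop := ∀ (rows : List (List (String × String))) (col_keys : Option (List String)) (head_row : Bool) (col_heads : Option (List (String × String))), Dom_tabulate rows col_keys head_row col_heads → Pre_tabulate rows col_keys head_row col_heads → Spec_tabulate rows col_keys head_row col_heads (tabulate rows col_keys head_row col_heads)

-- ===== LEMMAS AND PROOFS =====

-- lookups in a dict built by inserting (j, f j) for j over ks
lemma pv_getD_foldl_insert {ν : Type} (f : String → ν) (d0 : ν) :
    ∀ (ks : List String) (d : PySem.Dict String ν) (k : String),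
      (k ∈ ks ∨ d.getD k d0 = f k) →
      (ks.foldl (fun d j => d.insert j (f j)) d).getD k d0 = f k := by
  intro ks
  induction ks with
  | nil => intro d k h; simpa using h.resolve_left (by simp)
  | cons j t ih =>
    intro d k h
    simp only [List.foldl_cons]
    apply ih
    by_cases hkj : k = j
    · subst hkj
      right
      rw [PySem.Dict.getD_insert_self]
    · rcases h with h | h
      · rcases List.mem_cons.mp h with h | h
        · exact absurd h hkj
        · exact Or.inl h
      · right
        rw [PySem.Dict.getD_insert_of_ne (hne := hkj)]
        exact h

lemma pv_getD_ofList_map {ν : Type} (f : String → ν) (d0 : ν) (ks : List String) (k : String)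
    (hk : k ∈ ks) : (PySem.Dict.ofList (ks.map fun j => (j, f j))).getD k d0 = f k := by
  have h1 : PySem.Dict.ofList (ks.map fun j => (j, f j))
      = ks.foldl (fun d j => d.insert j (f j)) PySem.Dict.empty := by
    show (ks.map fun j => (j, f j)).foldl (fun d p => d.insert p.1 p.2) PySem.Dict.empty = _
    rw [List.foldl_map]
  rw [h1]
  exact pv_getD_foldl_insert f d0 ks _ k (Or.inl hk)

-- B's per-column data maximum is A's per-key data maximum
lemma pv_maxLenB (rows : List (List (String × String))) (k : String) :
    pvMaxLenB (rows.map fun r => (PySem.Dict.ofList r).getD k "") = pvDataMaxA rows k := by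
  unfold pvMaxLenB pvDataMaxA
  rw [List.map_map]
  rfl

-- getD two places past the head of a double cons
lemma pv_getD_cons_cons {β : Type} (a b : β) (l : List β) (i : Nat) (d : β) :
    (a :: b :: l).getD (i + 2) d = l.getD i d := by
  simp [List.getD_eq_getElem?_getD]

-- the core equality for a fixed key list, once A's heads dict agrees with B's head cells
lemma pv_core (rows : List (List (String × String))) (ks : List String) (head_row : Bool)
    (col_heads : Option (List (String × String))) (heads : PySem.Dict String String)
    (hhead : head_row = true → ∀ k ∈ ks, heads.getD k "" = pvHeadCellB col_heads k) :
    (let widths := pvWidthsA rows ks head_row heads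
     let sep := "├" ++ PySem.Str.join "┼" (ks.map fun k => pvHrule (widths.getD k 0)) ++ "┤"
     if head_row then
       PySem.Str.join "\n" (pvRowStrA ks widths heads :: sep :: rows.map (fun r => pvRowStrA ks widths (PySem.Dict.ofList r)))
     else
       PySem.Str.join "\n" (rows.map (fun r => pvRowStrA ks widths (PySem.Dict.ofList r))))
    =
    (let cols := ks.map (pvColB rows head_row col_heads)
     let n := rows.length + (if head_row then 2 else 0)
     let lines := (List.range n).map fun i =>
       let segs := cols.map fun col => col.getD i ""
       if head_row = true ∧ i = 1 then "├" ++ PySem.Str.join "┼" segs ++ "┤"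
       else "│" ++ PySem.Str.join "│" segs ++ "│"
     PySem.Str.join "\n" lines) := by
  cases head_row with
  | false =>
    simp only [Bool.false_eq_true, if_false, false_and, List.map_map]
    -- widths lookup
    have hW : ∀ k ∈ ks, (pvWidthsA rows ks false heads).getD k 0 = pvDataMaxA rows k + 1 := by
      intro k hk
      unfold pvWidthsA
      simpa using pv_getD_ofList_map
        (fun k => max (pvDataMaxA rows k) (if false = true then pvLen (heads.getD k "") else 0) + 1) 0 ks k hk
    congr 1
    -- lines: rows.map rowline = (range len).map transposed-line
    apply List.ext_getElem
    · simp
    · intro i h1 h2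
      simp only [List.getElem_map, List.getElem_range]
      unfold pvRowStrA
      congr 2
      refine congrArg (PySem.Str.join _) (List.map_congr_left ?_)
      intro k hk
      simp only [Function.comp_def, pvColB, Bool.false_eq_true, if_false]
      rw [hW k hk, pv_maxLenB rows k]
      have hi : i < rows.length := by simpa using h1
      simp [List.getD_eq_getElem?_getD, List.getElem?_map, List.getElem?_eq_getElem hi]
  | true =>
    simp only [reduceIte, true_and]
    have hhead' := hhead rfl
    have hW : ∀ k ∈ ks, (pvWidthsA rows ks true heads).getD k 0
        = max (pvDataMaxA rows k) (pvLen (pvHeadCellB col_heads k)) + 1 := by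
      intro k hk
      unfold pvWidthsA
      simpa [hhead' k hk] using pv_getD_ofList_map
        (fun k => max (pvDataMaxA rows k) (if true = true then pvLen (heads.getD k "") else 0) + 1) 0 ks k hk
    -- each column is head :: rule :: padded cells, all with width W k
    have hcol : ∀ k ∈ ks, pvColB rows true col_heads k
        = pvLjust (pvHeadCellB col_heads k) ((pvWidthsA rows ks true heads).getD k 0)
          :: pvHrule ((pvWidthsA rows ks true heads).getD k 0)
          :: rows.map (fun r => pvLjust ((PySem.Dict.ofList r).getD k "") ((pvWidthsA rows ks true heads).getD k 0)) := by
      intro k hk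
      simp only [pvColB, reduceIte]
      rw [pv_maxLenB rows k, hW k hk, List.map_map]
      rfl
    -- unfold range (len + 2)
    have hrange : List.range (rows.length + 2)
        = 0 :: 1 :: (List.range rows.length).map (fun j => j + 2) := by
      rw [List.range_succ_eq_map, List.range_succ_eq_map]
      simp [List.map_map, Function.comp_def, Nat.add_comm, Nat.succ_eq_add_one]
      omega
    rw [hrange]
    simp only [List.map_cons, List.map_map, Function.comp_def]
    congr 1
    congr 1
    · -- line 0 = header row string
      simp only [Nat.zero_ne_one, if_false]
      unfold pvRowStrA
      congr 2
      refine congrArg (PySem.Str.join _) (List.map_congr_left ?_)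
      intro k hk
      rw [hhead' k hk, hcol k hk]
      rfl
    congr 1
    · -- line 1 = separator
      simp only [reduceIte]
      congr 2
      refine congrArg (PySem.Str.join _) (List.map_congr_left ?_)
      intro k hk
      rw [hcol k hk]
      rfl
    · -- lines j+2 = data rows
      apply List.ext_getElem
      · simp
      · intro i h1 h2
        simp only [List.getElem_map, List.getElem_range]
        have hne : ¬ (i + 2 = 1) := by omega
        simp only [hne, if_false]
        unfold pvRowStrA
        congr 2
        refine congrArg (PySem.Str.join _) (List.map_congr_left ?_)
        intro k hk
        rw [hcol k hk, pv_getD_cons_cons]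
        have hi : i < rows.length := by simpa using h1
        simp [List.getD_eq_getElem?_getD, List.getElem?_map, List.getElem?_eq_getElem hi]

lemma pv_main (rows : List (List (String × String))) (col_keys : Option (List String))
    (head_row : Bool) (col_heads : Option (List (String × String))) :
    tabulate rows col_keys head_row col_heads = tabulate_alt rows col_keys head_row col_heads := by
  have hhead : head_row = true → ∀ k ∈ pvKeys rows col_keys,
      (pvHeadsA (pvKeys rows col_keys) col_heads).getD k "" = pvHeadCellB col_heads k := by
    intro _ k hk
    rcases col_heads with _ | d
    · exact pv_getD_ofList_map (fun j => j) "" _ k hk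
    · by_cases hd : d = []
      · subst hd
        simp only [pvHeadsA, pvHeadCellB, reduceIte]
        exact pv_getD_ofList_map (fun j => j) "" _ k hk
      · simp only [pvHeadsA, pvHeadCellB, if_neg hd]
  exact pv_core rows (pvKeys rows col_keys) head_row col_heads _ hhead

-- ===== VERDICT (by name: the statement is the Claim_ definition above) =====
theorem tabulate_spec : Claim_equal_tabulate := by
  intro rows col_keys head_row col_heads _ _
  unfold Spec_tabulate
  exact pv_main rows col_keys head_row col_heads
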